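-- pv_equiv track=rewrite | github.com/shilpas1003/PythonBeginner_v1 | GoodPair.py | solve
-- ===== SOURCE A (Python) =====
-- def solve(A):
--     # Also Special Subsequences "AG"
--     count = 0
--     gs = 0
--     n = len(A)
--     for i in reversed(range(n)):
--         if A[i] == 'G':
--             gs += 1
--         elif A[i] =='A':
--             count += gs
--     return count
-- ===== SOURCE B (Python) =====
-- def solve(A):
--     # Also Special Subsequences "AG"
--     # staged: build an explicit prefix table of 'A' counts, then sum it at 'G' positions
--     apre = [0]
--     for ch in A:
--         apre.append(apre[-1] + (1 if ch == 'A' else 0))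
--     return sum(a for a, ch in zip(apre, A) if ch == 'G')
-- ===== Notes on version B (the rewrite author's own statement) =====
-- stated objective: alternative
-- what changed: Replaces A's single backward index loop carrying two running counters by a staged design: first build an explicit prefix table apre of cumulative 'A' counts, then sum that table at the 'G' positions via zip; the pairing is materialised as a data structure instead of being fused into one pass.
import Mathlib
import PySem

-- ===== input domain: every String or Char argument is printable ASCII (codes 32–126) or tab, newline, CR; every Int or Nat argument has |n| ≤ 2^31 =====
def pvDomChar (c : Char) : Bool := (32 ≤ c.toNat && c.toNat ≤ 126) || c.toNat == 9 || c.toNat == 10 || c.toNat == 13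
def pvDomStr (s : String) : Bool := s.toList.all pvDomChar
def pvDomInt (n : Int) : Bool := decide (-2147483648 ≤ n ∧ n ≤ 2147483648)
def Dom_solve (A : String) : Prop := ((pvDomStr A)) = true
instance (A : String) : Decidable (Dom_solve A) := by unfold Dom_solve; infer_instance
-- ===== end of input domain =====

-- B replaces A's fused backward index loop (two running counters) by a staged design: it first
-- materialises a prefix table of cumulative 'A' counts, then sums that table at the 'G' positions.

-- ===== PORT A =====
-- one step of A's loop body: state (count, gs), character A[i]
def solveStepA (st : Int × Int) (c : Char) : Int × Int :=
  if c = 'G' then (st.1, st.2 + 1)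
  else if c = 'A' then (st.1 + st.2, st.2)
  else st

def solve (A : String) : Int :=
  let n : Int := (A.toList.length : Int)
  (List.foldl
    (fun st i =>
      match PySem.Str.pyGet? A i with
      | some c => solveStepA st c
      | none => st)
    ((0 : Int), (0 : Int))
    ((PySem.List.pyRange 0 n 1).reverse)).1

-- ===== PORT B =====
-- apre.append(apre[-1] + (1 if ch == 'A' else 0)), starting from [0]
def buildApre (l : List Char) : List Int :=
  l.foldl (fun acc ch => acc ++ [(acc.getLast?.getD 0) + (if ch = 'A' then 1 else 0)]) [(0 : Int)]

def solve_alt (A : String) : Int :=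
  let apre := buildApre A.toList
  ((apre.zip A.toList).foldl (fun s p => if p.2 = 'G' then s + p.1 else s) 0)

-- ===== PRECONDITION & SPEC =====
def Spec_solve (A : String) (out : Int) : Prop := out = solve_alt A
instance (A : String) (out : Int) : Decidable (Spec_solve A out) := by unfold Spec_solve; infer_instance

-- ===== CLAIM (what is proved, stated in full; the proofs are below) =====
def Claim_equal_solve : Prop := ∀ (A : String), Dom_solve A → Spec_solve A (solve A)

-- ===== LEMMAS AND PROOFS =====

-- number of 'A' / 'G' in a list, and the number of (A, later G) pairs
def cntA (l : List Char) : Int := ((l.filter (· = 'A')).length : Int)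
def cntG (l : List Char) : Int := ((l.filter (· = 'G')).length : Int)
def pairsAG : List Char → Int
  | [] => 0
  | c :: t => (if c = 'A' then cntG t else 0) + pairsAG t

-- A's backward index loop over l equals a foldr of the same step over the characters
theorem foldA_eq_foldr (l : List Char) (s : Int × Int) :
    List.foldl
      (fun st i =>
        match PySem.List.pyGet? l i with
        | some c => solveStepA st c
        | none => st)
      s ((PySem.List.pyRange 0 (l.length : Int) 1).reverse)
    = List.foldr (fun c st => solveStepA st c) s l := by
  induction l using List.reverseRecOn generalizing s with
  | nil => simp [PySem.List.pyRange_one_eq_nil]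
  | append_singleton t c ih =>
    have hlen : ((t ++ [c]).length : Int) = (t.length : Int) + 1 := by
      simp
    rw [hlen, PySem.List.pyRange_one_succ_right (by positivity)]
    simp only [List.reverse_append, List.reverse_cons, List.reverse_nil, List.nil_append,
      List.singleton_append, List.foldl_cons]
    have hget : PySem.List.pyGet? (t ++ [c]) (t.length : Int) = some c := by
      simpa using PySem.List.pyGet?_append_length (pre := t) (y := c) (ys := [])
    rw [hget]
    have hcong :
        List.foldl
          (fun st i =>
            match PySem.List.pyGet? (t ++ [c]) i with
            | some x => solveStepA st x
            | none => st)
          (solveStepA s c) ((PySem.List.pyRange 0 (t.length : Int) 1).reverse)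
        = List.foldl
          (fun st i =>
            match PySem.List.pyGet? t i with
            | some x => solveStepA st x
            | none => st)
          (solveStepA s c) ((PySem.List.pyRange 0 (t.length : Int) 1).reverse) := by
      apply PySem.List.foldl_congr_mem
      intro st i hi
      have hi' : 0 ≤ i ∧ i < (t.length : Int) := by
        have := (PySem.List.mem_pyRange_one).mp (List.mem_reverse.mp hi)
        omega
      have : PySem.List.pyGet? (t ++ [c]) i = PySem.List.pyGet? t i := by
        rw [PySem.List.pyGet?_of_nonneg (xs := t ++ [c]) hi'.1,
          PySem.List.pyGet?_of_nonneg (xs := t) hi'.1]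
        have hlt : i.toNat < t.length := by omega
        simp [List.getElem?_append_left hlt]
      rw [this]
    rw [hcong, ih]
    simp [List.foldr_append]

theorem cntA_cons (c : Char) (t : List Char) :
    cntA (c :: t) = (if c = 'A' then 1 else 0) + cntA t := by
  simp only [cntA, List.filter_cons]
  split_ifs with h <;> simp_all <;> omega
theorem cntG_cons (c : Char) (t : List Char) :
    cntG (c :: t) = (if c = 'G' then 1 else 0) + cntG t := by
  simp only [cntG, List.filter_cons]
  split_ifs with h <;> simp_all <;> omega

-- closed form of A's foldr
theorem foldrA_closed (l : List Char) (s : Int × Int) :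
    List.foldr (fun c st => solveStepA st c) s l
      = (s.1 + pairsAG l + s.2 * cntA l, s.2 + cntG l) := by
  induction l with
  | nil => simp [pairsAG, cntA, cntG]
  | cons c t ih =>
    rw [List.foldr_cons, ih]
    simp only [solveStepA, pairsAG, cntA_cons, cntG_cons]
    split_ifs with hG hA <;> simp_all [Prod.ext_iff] <;> first | (constructor <;> ring) | ring | trivial

-- B's table-building loop produces a prefix-sum scan
def fA (a : Int) (c : Char) : Int := a + (if c = 'A' then 1 else 0)

theorem buildApre_general (l : List Char) (pre : List Int) (a : Int) :
    l.foldl (fun acc ch => acc ++ [(acc.getLast?.getD 0) + (if ch = 'A' then 1 else 0)])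
      (pre ++ [a])
    = pre ++ List.scanl fA a l := by
  induction l generalizing pre a with
  | nil => simp [List.scanl]
  | cons c t ih =>
    rw [List.foldl_cons]
    have hlast : ((pre ++ [a]).getLast?.getD 0) = a := by simp
    rw [hlast]
    have : (pre ++ [a]) ++ [a + (if c = 'A' then 1 else 0)]
         = (pre ++ [a]) ++ [fA a c] := by simp [fA]
    rw [this, List.append_assoc] at *
    have := ih (pre := pre ++ [a]) (a := fA a c)
    simpa [List.append_assoc, List.scanl] using this

theorem buildApre_eq_scanl (l : List Char) : buildApre l = List.scanl fA 0 l := by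
  have := buildApre_general l [] 0
  simpa [buildApre] using this

-- summing the scan at the 'G' positions counts a·(# G) plus the (A, later G) pairs
theorem zip_scan_sum (t : List Char) (a s : Int) :
    ((List.scanl fA a t).zip t).foldl (fun s p => if p.2 = 'G' then s + p.1 else s) s
    = s + a * cntG t + pairsAG t := by
  induction t generalizing a s with
  | nil => simp [cntG, pairsAG]
  | cons c t' ih =>
    rw [List.scanl_cons]
    simp only [List.zip_cons_cons, List.foldl_cons]
    rw [ih]
    simp only [pairsAG, cntG_cons, fA]
    split_ifs <;> ring

-- ===== VERDICT (by name: the statement is the Claim_ definition above) =====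
theorem solve_spec : Claim_equal_solve := by
  intro A _
  unfold Spec_solve solve solve_alt
  have hstr : ∀ i, PySem.Str.pyGet? A i = PySem.List.pyGet? A.toList i := by
    intro i; simp [PySem.Str.pyGet?]
  simp only [hstr]
  rw [foldA_eq_foldr A.toList ((0 : Int), (0 : Int)), foldrA_closed,
    buildApre_eq_scanl, zip_scan_sum]
  simp
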